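-- pv_equiv track=rewrite | github.com/wusabbrin/ChoyDioptric | utils/tool_belt.py | _strip_err
-- ===== SOURCE A (Python) =====
-- def _strip_err(err):
--     """Get the representation of the error, which is alway just the trailing non-zero digits
--
--     Parameters
--     ----------
--     err : str
--         Error to process
--
--     Returns
--     -------
--     str
--         Trailing non-zero digits of err
--     """
--
--     stripped_err = ""
--     trailing = False
--     for char in str(err):
--         if char == ".":
--             continue
--         elif char != "0":
--             trailing = True
--         if trailing:
--             stripped_err += char
--     return stripped_err
-- ===== SOURCE B (Python) =====
-- def _strip_err(err):
--     """Find the start of the trailing part (first char that is neither '.' nor '0'),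
--     then return that suffix with its dots removed."""
--     s = str(err)
--     i = 0
--     while i < len(s) and s[i] in ".0":
--         i += 1
--     return s[i:].replace(".", "")
-- ===== Notes on version B (the rewrite author's own statement) =====
-- stated objective: alternative
-- what changed: Instead of one accumulating pass with a 'trailing' flag over every character, B first searches for the start index of the trailing part (first char outside '.0'), then transforms only that suffix with a slice plus replace('.', ''); the prefix is never filtered or copied.
import Mathlib
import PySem

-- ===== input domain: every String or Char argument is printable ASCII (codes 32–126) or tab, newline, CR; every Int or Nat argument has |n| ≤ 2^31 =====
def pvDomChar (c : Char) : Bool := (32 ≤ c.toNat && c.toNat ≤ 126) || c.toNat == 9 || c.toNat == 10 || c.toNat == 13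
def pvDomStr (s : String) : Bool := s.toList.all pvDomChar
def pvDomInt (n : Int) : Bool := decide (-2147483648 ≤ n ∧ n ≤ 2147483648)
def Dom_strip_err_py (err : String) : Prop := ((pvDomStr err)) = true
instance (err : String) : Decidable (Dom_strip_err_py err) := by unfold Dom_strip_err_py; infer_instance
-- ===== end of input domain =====

-- B replaces A's accumulating flag loop by a search for the start index of the trailing part,
-- then a slice + replace('.', '') on that suffix only; equal return values proved on Dom.

-- ===== PORT A =====
-- one loop iteration: skip '.', set trailing on a nonzero char, append while trailing
def stripErrStep (st : List Char × Bool) (c : Char) : List Char × Bool :=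
  if c = '.' then st
  else
    let tr := st.2 || decide (c ≠ '0')
    (if tr then st.1 ++ [c] else st.1, tr)

def strip_err_py (err : String) : String :=
  String.ofList (err.toList.foldl stripErrStep ([], false)).1

-- ===== PORT B =====
-- the while loop 'i += 1 while s[i] in ".0"' advances past the leading run; each iteration drops one head char
def altSkip : List Char → List Char
  | [] => []
  | c :: cs => if c = '.' || c = '0' then altSkip cs else c :: cs

def strip_err_py_alt (err : String) : String :=
  -- s[i:] is the remainder left by the while loop; .replace(".", "") removes every dot (exact here: filter of non-dot chars)
  String.ofList ((altSkip err.toList).filter (fun c => decide (c ≠ '.')))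

-- ===== PRECONDITION & SPEC =====
def Spec_strip_err_py (err : String) (out : String) : Prop := out = strip_err_py_alt err
instance (err : String) (out : String) : Decidable (Spec_strip_err_py err out) := by unfold Spec_strip_err_py; infer_instance

-- ===== CLAIM (what is proved, stated in full; the proofs are below) =====
def Claim_equal_strip_err_py : Prop := ∀ (err : String), Dom_strip_err_py err → Spec_strip_err_py err (strip_err_py err)

-- ===== LEMMAS AND PROOFS =====

-- once trailing, A's loop appends every non-dot char
lemma stripErr_foldl_true (cs : List Char) (acc : List Char) :
    cs.foldl stripErrStep (acc, true)
      = (acc ++ cs.filter (fun c => decide (c ≠ '.')), true) := by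
  induction cs generalizing acc with
  | nil => simp
  | cons c cs ih =>
    by_cases h : c = '.'
    · simp [stripErrStep, h, ih]
    · simp [stripErrStep, h, ih, List.append_assoc]

-- before trailing, A's loop output is B's value: dots filtered from the suffix past the '.0' run
lemma stripErr_foldl_false (cs : List Char) (acc : List Char) :
    (cs.foldl stripErrStep (acc, false)).1
      = acc ++ (altSkip cs).filter (fun c => decide (c ≠ '.')) := by
  induction cs generalizing acc with
  | nil => simp [altSkip]
  | cons c cs ih =>
    by_cases h : c = '.'
    · simp [stripErrStep, altSkip, h, ih]
    · by_cases h0 : c = '0'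
      · simp [stripErrStep, altSkip, h0, ih]
      · simp [stripErrStep, altSkip, h, h0, stripErr_foldl_true, List.append_assoc]

-- ===== VERDICT (by name: the statement is the Claim_ definition above) =====
theorem strip_err_py_spec : Claim_equal_strip_err_py := by
  intro err _
  unfold Spec_strip_err_py strip_err_py strip_err_py_alt
  rw [stripErr_foldl_false]
  simp
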